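-- pv_equiv track=rewrite | github.com/AMIVAYUN/codeTestPrac | Programmers/Python/고고학최고의 발견_np.py | getNextpos
-- ===== SOURCE A (Python) =====
-- def getNextpos( graph ):
--     leng = len( graph );
--     Mx = ( 0, [ 0, 0 ] );
--     dx, dy = [ -1, 1, 0, 0 ],[ 0, 0, -1, 1 ];
--     for x in range( leng ):
--         for y in range( leng ):
--             if( graph[ x ][ y ] ):
--                 sum_ = 0;
--                 for i in range( 4 ):
--                     nx = x + dx[ i ];
--                     ny = y + dy[ i ];
--
--                     if( 0<= nx < leng and 0<= ny < leng ):
--                         sum_ += graph[ nx ][ ny ];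
--
--                 if( Mx[ 0 ] < sum_ ):
--                     Mx = ( sum_, [ x, y ] );
--
--     return Mx;
-- ===== SOURCE B (Python) =====
-- def getNextpos(graph):
--     # Build the whole neighbor-sum grid by adding four zero-padded shifts
--     # (rows above/below, row shifted right/left), then scan once for the best
--     # truthy cell with a strictly larger sum (first occurrence wins).
--     n = len(graph)
--     g = [row[:n] for row in graph]
--     zero = [0] * n
--     ns = []
--     for x in range(n):
--         up = g[x - 1] if x > 0 else zero
--         down = g[x + 1] if x + 1 < n else zero
--         r = g[x]
--         left = [0] + r[:n - 1]
--         right = r[1:] + [0]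
--         ns.append([up[y] + down[y] + left[y] + right[y] for y in range(n)])
--     best = (0, [0, 0])
--     for x in range(n):
--         for y in range(n):
--             if g[x][y] and best[0] < ns[x][y]:
--                 best = (ns[x][y], [x, y])
--     return best
-- ===== Notes on version B (the rewrite author's own statement) =====
-- stated objective: faster
-- what changed: Instead of looping over the four direction offsets per cell with per-neighbor bounds checks, B precomputes the whole neighbor-sum grid by adding four zero-padded shifted copies of the grid (row above, row below, row shifted right, row shifted left) and then does a single scan picking the first strictly-larger truthy cell; measured ~3x faster (constant factor).
import Mathlib
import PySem

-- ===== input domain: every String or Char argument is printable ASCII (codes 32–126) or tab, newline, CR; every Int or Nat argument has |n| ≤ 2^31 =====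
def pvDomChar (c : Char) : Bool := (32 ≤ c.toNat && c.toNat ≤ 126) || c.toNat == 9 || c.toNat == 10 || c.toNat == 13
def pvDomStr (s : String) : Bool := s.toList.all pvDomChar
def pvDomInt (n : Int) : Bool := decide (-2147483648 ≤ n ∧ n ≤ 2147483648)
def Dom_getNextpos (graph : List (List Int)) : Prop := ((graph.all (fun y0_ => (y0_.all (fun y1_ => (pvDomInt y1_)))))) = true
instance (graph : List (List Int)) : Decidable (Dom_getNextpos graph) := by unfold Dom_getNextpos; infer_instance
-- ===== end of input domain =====

-- B builds the whole neighbor-sum grid at once from four zero-padded shifted copies of the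
-- grid (row above, row below, row shifted right, row shifted left) and then scans it once,
-- instead of A's per-cell loop over direction offsets; measured faster by a constant factor.

-- ===== PORT A =====
def getNextpos (graph : List (List Int)) : Int × List Int :=
  let leng : Int := (graph.length : Int)
  let dx : List Int := [-1, 1, 0, 0]
  let dy : List Int := [0, 0, -1, 1]
  (PySem.List.pyRange 0 leng 1).foldl (fun Mx x =>
    (PySem.List.pyRange 0 leng 1).foldl (fun Mx y =>
      if PySem.List.pyGetD (PySem.List.pyGetD graph x []) y 0 ≠ 0 then
        let sum_ : Int := (PySem.List.pyRange 0 4 1).foldl (fun s i =>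
          let nx := x + PySem.List.pyGetD dx i 0
          let ny := y + PySem.List.pyGetD dy i 0
          if 0 ≤ nx ∧ nx < leng ∧ 0 ≤ ny ∧ ny < leng then
            s + PySem.List.pyGetD (PySem.List.pyGetD graph nx []) ny 0
          else s) 0
        if Mx.1 < sum_ then (sum_, [x, y]) else Mx
      else Mx) Mx) (0, [0, 0])

-- ===== PORT B =====
def getNextpos_alt (graph : List (List Int)) : Int × List Int :=
  let n : Int := (graph.length : Int)
  let g : List (List Int) := graph.map (fun row => PySem.List.slice row none (some n))
  let zero : List Int := List.replicate n.toNat 0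
  let ns : List (List Int) := (PySem.List.pyRange 0 n 1).foldl (fun ns x =>
    let up := if 0 < x then PySem.List.pyGetD g (x - 1) [] else zero
    let down := if x + 1 < n then PySem.List.pyGetD g (x + 1) [] else zero
    let r := PySem.List.pyGetD g x []
    let left := [0] ++ PySem.List.slice r none (some (n - 1))
    let right := PySem.List.slice r (some 1) none ++ [0]
    ns ++ [(PySem.List.pyRange 0 n 1).map (fun y =>
      PySem.List.pyGetD up y 0 + PySem.List.pyGetD down y 0 +
      PySem.List.pyGetD left y 0 + PySem.List.pyGetD right y 0)]) []
  (PySem.List.pyRange 0 n 1).foldl (fun best x =>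
    (PySem.List.pyRange 0 n 1).foldl (fun best y =>
      if PySem.List.pyGetD (PySem.List.pyGetD g x []) y 0 ≠ 0 ∧
         best.1 < PySem.List.pyGetD (PySem.List.pyGetD ns x []) y 0 then
        (PySem.List.pyGetD (PySem.List.pyGetD ns x []) y 0, [x, y])
      else best) best) (0, [0, 0])

-- ===== PRECONDITION & SPEC =====
-- Pre_ excludes exactly the inputs on which A raises IndexError: a row shorter than the
-- number of rows (A indexes every row at all columns 0..len(graph)-1).
def Pre_getNextpos (graph : List (List Int)) : Prop :=
  ∀ row ∈ graph, graph.length ≤ row.length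
instance (graph : List (List Int)) : Decidable (Pre_getNextpos graph) := by
  unfold Pre_getNextpos; infer_instance
def pvWitness_getNextpos : List (List Int) := [[1, 0], [0, 2]]
def Spec_getNextpos (graph : List (List Int)) (out : Int × List Int) : Prop := out = getNextpos_alt graph
instance (graph : List (List Int)) (out : Int × List Int) : Decidable (Spec_getNextpos graph out) := by unfold Spec_getNextpos; infer_instance

-- ===== CLAIM (what is proved, stated in full; the proofs are below) =====
def Claim_equal_getNextpos : Prop := ∀ (graph : List (List Int)), Dom_getNextpos graph → Pre_getNextpos graph → Spec_getNextpos graph (getNextpos graph)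

-- ===== LEMMAS AND PROOFS =====

-- value of graph[x][y] when in the n×n window, else 0
def nbr (graph : List (List Int)) (x y : Int) : Int :=
  if 0 ≤ x ∧ x < (graph.length : Int) ∧ 0 ≤ y ∧ y < (graph.length : Int) then
    (graph.getD x.toNat []).getD y.toNat 0
  else 0

lemma row_len {graph : List (List Int)} (hpre : Pre_getNextpos graph)
    {i : Nat} (hi : i < graph.length) : graph.length ≤ graph[i].length :=
  hpre _ (graph.getElem_mem hi)

lemma pyget2 {graph : List (List Int)} (hpre : Pre_getNextpos graph)
    {x y : Int} (hx0 : 0 ≤ x) (hxn : x < (graph.length : Int))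
    (hy0 : 0 ≤ y) (hyn : y < (graph.length : Int)) :
    PySem.List.pyGetD (PySem.List.pyGetD graph x []) y 0
      = (graph.getD x.toNat []).getD y.toNat 0 := by
  have hx' : x.toNat < graph.length := by omega
  have hrow : graph.length ≤ graph[x.toNat].length := row_len hpre hx'
  have hy' : y.toNat < graph[x.toNat].length := by omega
  rw [PySem.List.pyGetD_eq_getElem graph [] hx0 hxn]
  rw [PySem.List.pyGetD_eq_getElem _ 0 hy0 (by omega)]
  rw [List.getD_eq_getElem graph [] hx', List.getD_eq_getElem _ 0 hy']

lemma sumA_eq {graph : List (List Int)} (hpre : Pre_getNextpos graph) (x y : Int) :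
    (PySem.List.pyRange 0 4 1).foldl (fun s i =>
      if 0 ≤ x + PySem.List.pyGetD [-1, 1, 0, 0] i 0 ∧
         x + PySem.List.pyGetD [-1, 1, 0, 0] i 0 < (graph.length : Int) ∧
         0 ≤ y + PySem.List.pyGetD [0, 0, -1, 1] i 0 ∧
         y + PySem.List.pyGetD [0, 0, -1, 1] i 0 < (graph.length : Int) then
        s + PySem.List.pyGetD
              (PySem.List.pyGetD graph (x + PySem.List.pyGetD [-1, 1, 0, 0] i 0) [])
              (y + PySem.List.pyGetD [0, 0, -1, 1] i 0) 0
      else s) 0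
    = nbr graph (x - 1) y + nbr graph (x + 1) y + nbr graph x (y - 1) + nbr graph x (y + 1) := by
  have hr : PySem.List.pyRange 0 4 1 = [0, 1, 2, 3] := by decide
  have d0 : PySem.List.pyGetD ([-1, 1, 0, 0] : List Int) 0 0 = -1 := by decide
  have d1 : PySem.List.pyGetD ([-1, 1, 0, 0] : List Int) 1 0 = 1 := by decide
  have d2 : PySem.List.pyGetD ([-1, 1, 0, 0] : List Int) 2 0 = 0 := by decide
  have d3 : PySem.List.pyGetD ([-1, 1, 0, 0] : List Int) 3 0 = 0 := by decide
  have e0 : PySem.List.pyGetD ([0, 0, -1, 1] : List Int) 0 0 = 0 := by decide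
  have e1 : PySem.List.pyGetD ([0, 0, -1, 1] : List Int) 1 0 = 0 := by decide
  have e2 : PySem.List.pyGetD ([0, 0, -1, 1] : List Int) 2 0 = -1 := by decide
  have e3 : PySem.List.pyGetD ([0, 0, -1, 1] : List Int) 3 0 = 1 := by decide
  have key : ∀ (s a b : Int),
      (if 0 ≤ a ∧ a < (graph.length : Int) ∧ 0 ≤ b ∧ b < (graph.length : Int) then
         s + PySem.List.pyGetD (PySem.List.pyGetD graph a []) b 0
       else s) = s + nbr graph a b := by
    intro s a b
    by_cases h : 0 ≤ a ∧ a < (graph.length : Int) ∧ 0 ≤ b ∧ b < (graph.length : Int)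
    · rw [if_pos h, pyget2 hpre h.1 h.2.1 h.2.2.1 h.2.2.2]
      simp [nbr, h]
    · simp [nbr, h]
  rw [hr]
  simp only [List.foldl_cons, List.foldl_nil, d0, d1, d2, d3, e0, e1, e2, e3]
  simp only [key]
  have h1 : x + -1 = x - 1 := by ring
  have h2 : y + -1 = y - 1 := by ring
  simp only [h1, h2, add_zero, zero_add]

lemma g_get {graph : List (List Int)} (hpre : Pre_getNextpos graph)
    {x y : Int} (hx0 : 0 ≤ x) (hxn : x < (graph.length : Int))
    (hy0 : 0 ≤ y) (hyn : y < (graph.length : Int)) :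
    PySem.List.pyGetD
        (PySem.List.pyGetD (graph.map (fun row => PySem.List.slice row none (some (graph.length : Int)))) x [])
        y 0
      = (graph.getD x.toNat []).getD y.toNat 0 := by
  have hx' : x.toNat < graph.length := by omega
  have hrow : graph.length ≤ graph[x.toNat].length := row_len hpre hx'
  have hy' : y.toNat < graph[x.toNat].length := by omega
  rw [PySem.List.pyGetD_eq_getElem _ [] hx0 (by simpa using hxn)]
  rw [List.getElem_map (h := by simpa using hx')]
  rw [PySem.List.slice_to _ (by positivity)]
  rw [PySem.List.pyGetD_eq_getElem _ 0 hy0 (by simp; omega)]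
  rw [List.getElem_take, List.getD_eq_getElem graph [] hx', List.getD_eq_getElem _ 0 hy']

lemma g_row {graph : List (List Int)} {x : Int} (hx0 : 0 ≤ x) (hxn : x < (graph.length : Int)) :
    PySem.List.pyGetD (graph.map (fun row => PySem.List.slice row none (some (graph.length : Int)))) x []
      = (graph.getD x.toNat []).take graph.length := by
  have hx' : x.toNat < graph.length := by omega
  rw [PySem.List.pyGetD_eq_getElem _ [] hx0 (by simpa using hxn)]
  rw [List.getElem_map (h := by simpa using hx')]
  rw [PySem.List.slice_to _ (by positivity)]
  rw [List.getD_eq_getElem graph [] hx']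
  simp

lemma r_len {graph : List (List Int)} (hpre : Pre_getNextpos graph)
    {x : Int} (hx0 : 0 ≤ x) (hxn : x < (graph.length : Int)) :
    ((graph.getD x.toNat []).take graph.length).length = graph.length := by
  have hx' : x.toNat < graph.length := by omega
  have := row_len hpre hx'
  rw [List.getD_eq_getElem graph [] hx']
  simp; omega

lemma r_get {graph : List (List Int)} (hpre : Pre_getNextpos graph)
    {x : Int} (hx0 : 0 ≤ x) (hxn : x < (graph.length : Int))
    {j : Nat} (hj : j < graph.length) :
    ((graph.getD x.toNat []).take graph.length)[j]'(by rw [r_len hpre hx0 hxn]; exact hj)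
      = (graph.getD x.toNat []).getD j 0 := by
  have hx' : x.toNat < graph.length := by omega
  have hrow := row_len hpre hx'
  rw [List.getElem_take, List.getD_eq_getElem _ 0 (by rw [List.getD_eq_getElem graph [] hx'] at *; omega)]

lemma up_term {graph : List (List Int)} (hpre : Pre_getNextpos graph)
    {x y : Int} (hx0 : 0 ≤ x) (hxn : x < (graph.length : Int))
    (hy0 : 0 ≤ y) (hyn : y < (graph.length : Int)) :
    PySem.List.pyGetD
        (if 0 < x then
          PySem.List.pyGetD (graph.map (fun row => PySem.List.slice row none (some (graph.length : Int)))) (x - 1) []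
        else List.replicate ((graph.length : Int)).toNat 0) y 0
      = nbr graph (x - 1) y := by
  by_cases h : 0 < x
  · rw [if_pos h, g_get hpre (by omega) (by omega) hy0 hyn]
    unfold nbr
    rw [if_pos ⟨by omega, by omega, hy0, hyn⟩]
  · rw [if_neg h]
    rw [PySem.List.pyGetD_eq_getElem _ 0 hy0 (by simp; omega)]
    unfold nbr
    rw [if_neg (by omega)]
    simp

lemma down_term {graph : List (List Int)} (hpre : Pre_getNextpos graph)
    {x y : Int} (hx0 : 0 ≤ x) (hxn : x < (graph.length : Int))
    (hy0 : 0 ≤ y) (hyn : y < (graph.length : Int)) :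
    PySem.List.pyGetD
        (if x + 1 < (graph.length : Int) then
          PySem.List.pyGetD (graph.map (fun row => PySem.List.slice row none (some (graph.length : Int)))) (x + 1) []
        else List.replicate ((graph.length : Int)).toNat 0) y 0
      = nbr graph (x + 1) y := by
  by_cases h : x + 1 < (graph.length : Int)
  · rw [if_pos h, g_get hpre (by omega) (by omega) hy0 hyn]
    unfold nbr
    rw [if_pos ⟨by omega, by omega, hy0, hyn⟩]
  · rw [if_neg h]
    rw [PySem.List.pyGetD_eq_getElem _ 0 hy0 (by simp; omega)]
    unfold nbr
    rw [if_neg (by omega)]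
    simp

lemma left_term {graph : List (List Int)} (hpre : Pre_getNextpos graph)
    {x y : Int} (hx0 : 0 ≤ x) (hxn : x < (graph.length : Int))
    (hy0 : 0 ≤ y) (hyn : y < (graph.length : Int)) :
    PySem.List.pyGetD
        ([0] ++ PySem.List.slice
          (PySem.List.pyGetD (graph.map (fun row => PySem.List.slice row none (some (graph.length : Int)))) x [])
          none (some ((graph.length : Int) - 1))) y 0
      = nbr graph x (y - 1) := by
  rw [g_row hx0 hxn, PySem.List.slice_to _ (by omega), List.singleton_append]
  by_cases h : 0 < y
  · have hlen : (((graph.getD x.toNat []).take graph.length).take ((graph.length : Int) - 1).toNat).length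
        = graph.length - 1 := by
      rw [List.length_take, r_len hpre hx0 hxn]; omega
    rw [PySem.List.pyGetD_eq_getElem _ 0 hy0 (by rw [List.length_cons, hlen]; omega)]
    rw [List.getElem_cons]
    rw [dif_neg (by omega)]
    rw [List.getElem_take, r_get hpre hx0 hxn (j := y.toNat - 1) (by omega)]
    unfold nbr
    rw [if_pos ⟨hx0, hxn, by omega, by omega⟩]
    congr 1
    omega
  · have hy' : y = 0 := by omega
    subst hy'
    rw [PySem.List.pyGetD_zero_cons]
    unfold nbr
    rw [if_neg (by omega)]

lemma right_term {graph : List (List Int)} (hpre : Pre_getNextpos graph)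
    {x y : Int} (hx0 : 0 ≤ x) (hxn : x < (graph.length : Int))
    (hy0 : 0 ≤ y) (hyn : y < (graph.length : Int)) :
    PySem.List.pyGetD
        (PySem.List.slice
          (PySem.List.pyGetD (graph.map (fun row => PySem.List.slice row none (some (graph.length : Int)))) x [])
          (some 1) none ++ [0]) y 0
      = nbr graph x (y + 1) := by
  rw [g_row hx0 hxn, PySem.List.slice_from _ (by omega)]
  have hrl := r_len hpre hx0 hxn
  have hlen : (((graph.getD x.toNat []).take graph.length).drop (1 : Int).toNat).length
      = graph.length - 1 := by rw [List.length_drop, hrl]; norm_num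
  rw [PySem.List.pyGetD_eq_getElem _ 0 hy0 (by rw [List.length_append, hlen, List.length_singleton]; omega)]
  rw [List.getElem_append]
  by_cases h : y + 1 < (graph.length : Int)
  · rw [dif_pos (by rw [hlen]; omega)]
    rw [List.getElem_drop, r_get hpre hx0 hxn (j := (1 : Int).toNat + y.toNat) (by omega)]
    unfold nbr
    rw [if_pos ⟨hx0, hxn, by omega, by omega⟩]
    congr 1
    omega
  · rw [dif_neg (by rw [hlen]; omega)]
    unfold nbr
    rw [if_neg (by omega)]
    simp

lemma ns_get {graph : List (List Int)} (hpre : Pre_getNextpos graph)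
    {x y : Int} (hx0 : 0 ≤ x) (hxn : x < (graph.length : Int))
    (hy0 : 0 ≤ y) (hyn : y < (graph.length : Int)) :
    PySem.List.pyGetD (PySem.List.pyGetD
      ((PySem.List.pyRange 0 (graph.length : Int) 1).foldl (fun ns x =>
        ns ++ [(PySem.List.pyRange 0 (graph.length : Int) 1).map (fun y =>
          PySem.List.pyGetD
              (if 0 < x then
                PySem.List.pyGetD (graph.map (fun row => PySem.List.slice row none (some (graph.length : Int)))) (x - 1) []
              else List.replicate ((graph.length : Int)).toNat 0) y 0 +
            PySem.List.pyGetD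
              (if x + 1 < (graph.length : Int) then
                PySem.List.pyGetD (graph.map (fun row => PySem.List.slice row none (some (graph.length : Int)))) (x + 1) []
              else List.replicate ((graph.length : Int)).toNat 0) y 0 +
            PySem.List.pyGetD
              ([0] ++ PySem.List.slice
                (PySem.List.pyGetD (graph.map (fun row => PySem.List.slice row none (some (graph.length : Int)))) x [])
                none (some ((graph.length : Int) - 1))) y 0 +
            PySem.List.pyGetD
              (PySem.List.slice
                (PySem.List.pyGetD (graph.map (fun row => PySem.List.slice row none (some (graph.length : Int)))) x [])
                (some 1) none ++ [0]) y 0)]) [])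
      x []) y 0
    = nbr graph (x - 1) y + nbr graph (x + 1) y + nbr graph x (y - 1) + nbr graph x (y + 1) := by
  rw [PySem.List.foldl_append_singleton_eq_map, List.nil_append]
  rw [PySem.List.pyGetD_map_pyRange_of_nonneg _ _ _ _ hx0 hxn]
  rw [PySem.List.pyGetD_map_pyRange_of_nonneg _ _ _ _ hy0 hyn]
  rw [up_term hpre hx0 hxn hy0 hyn, down_term hpre hx0 hxn hy0 hyn,
      left_term hpre hx0 hxn hy0 hyn, right_term hpre hx0 hxn hy0 hyn]

-- ===== VERDICT (by name: the statement is the Claim_ definition above) =====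
theorem getNextpos_spec : Claim_equal_getNextpos := by
  intro graph _ hpre
  unfold Spec_getNextpos getNextpos getNextpos_alt
  simp only []
  apply PySem.List.foldl_congr_mem
  intro acc x hx
  apply PySem.List.foldl_congr_mem
  intro acc2 y hy
  rw [PySem.List.mem_pyRange_one] at hx hy
  rw [ns_get hpre hx.1 hx.2 hy.1 hy.2]
  rw [g_get hpre hx.1 hx.2 hy.1 hy.2]
  rw [pyget2 hpre hx.1 hx.2 hy.1 hy.2]
  rw [sumA_eq hpre x y]
  split_ifs <;> tauto
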